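-- pv_equiv track=rewrite | github.com/ericpan64/zhongwen-extension | data_services/loadcedict.py | convert_digits_to_pinyin
-- ===== SOURCE A (Python) =====
-- def convert_digits_to_pinyin(s):
--     repl_dict = {
--         '0': 'líng',
--         '1': 'yī',
--         '2': 'èr',
--         '3': 'sān',
--         '4': 'sì',
--         '5': 'wǔ',
--         '6': 'liù',
--         '7': 'qī',
--         '8': 'bā',
--         '9': 'jiǔ',
--         '%': 'pā',
--     }
--     for k, v in repl_dict.items():
--         s = s.replace(k, v)
--     return s
-- ===== SOURCE B (Python) =====
-- def convert_digits_to_pinyin(s):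
--     def pinyin(c):
--         if c == '0': return 'líng'
--         if c == '1': return 'yī'
--         if c == '2': return 'èr'
--         if c == '3': return 'sān'
--         if c == '4': return 'sì'
--         if c == '5': return 'wǔ'
--         if c == '6': return 'liù'
--         if c == '7': return 'qī'
--         if c == '8': return 'bā'
--         if c == '9': return 'jiǔ'
--         if c == '%': return 'pā'
--         return c
--     return ''.join(map(pinyin, s))
-- ===== Notes on version B (the rewrite author's own statement) =====
-- stated objective: simpler
-- what changed: B drops the dict and the eleven whole-string replace() scans entirely: a per-character if-chain function is mapped once over s and joined, so the string is traversed a single time character-wise; equal because no replacement value contains any key.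
import Mathlib
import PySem

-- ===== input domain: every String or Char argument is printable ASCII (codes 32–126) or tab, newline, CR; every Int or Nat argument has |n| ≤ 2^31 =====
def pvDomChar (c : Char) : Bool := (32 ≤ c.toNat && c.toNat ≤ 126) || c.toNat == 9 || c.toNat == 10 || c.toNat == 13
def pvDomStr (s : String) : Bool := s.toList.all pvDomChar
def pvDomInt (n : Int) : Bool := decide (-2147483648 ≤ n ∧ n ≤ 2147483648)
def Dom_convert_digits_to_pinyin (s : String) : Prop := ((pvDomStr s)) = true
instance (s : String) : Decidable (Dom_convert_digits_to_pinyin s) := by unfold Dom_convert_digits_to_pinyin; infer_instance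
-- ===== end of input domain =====

-- B drops the dict and the eleven whole-string replace scans: a per-character if-chain
-- function is mapped once over s and joined (equal since no replacement value contains a key).

-- ===== PORT A =====
-- A's repl_dict (insertion order)
def pvAReplDict : PySem.Dict String String :=
  PySem.Dict.ofList [("0", "líng"), ("1", "yī"), ("2", "èr"), ("3", "sān"), ("4", "sì"),
    ("5", "wǔ"), ("6", "liù"), ("7", "qī"), ("8", "bā"), ("9", "jiǔ"), ("%", "pā")]

-- for k, v in repl_dict.items(): s = s.replace(k, v); return s
def convert_digits_to_pinyin (s : String) : String :=
  pvAReplDict.items.foldl (fun s kv => PySem.Str.replace s kv.1 kv.2) s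

-- ===== PORT B =====
-- def pinyin(c): the if-chain, returning c itself when no branch fires
def pvPinyin (c : Char) : String :=
  if c = '0' then "líng" else
  if c = '1' then "yī" else
  if c = '2' then "èr" else
  if c = '3' then "sān" else
  if c = '4' then "sì" else
  if c = '5' then "wǔ" else
  if c = '6' then "liù" else
  if c = '7' then "qī" else
  if c = '8' then "bā" else
  if c = '9' then "jiǔ" else
  if c = '%' then "pā" else
  String.singleton c

-- return ''.join(map(pinyin, s))
def convert_digits_to_pinyin_alt (s : String) : String :=
  PySem.Str.join "" (s.toList.map pvPinyin)

-- ===== PRECONDITION & SPEC =====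
def Spec_convert_digits_to_pinyin (s : String) (out : String) : Prop := out = convert_digits_to_pinyin_alt s
instance (s : String) (out : String) : Decidable (Spec_convert_digits_to_pinyin s out) := by unfold Spec_convert_digits_to_pinyin; infer_instance

-- ===== CLAIM (what is proved, stated in full; the proofs are below) =====
def Claim_equal_convert_digits_to_pinyin : Prop := ∀ (s : String), Dom_convert_digits_to_pinyin s → Spec_convert_digits_to_pinyin s (convert_digits_to_pinyin s)

-- ===== LEMMAS AND PROOFS =====

-- replacing a single-character needle is a character-wise flatMap
theorem replace_go_single (k : Char) (v : List Char) :
    ∀ (l acc : List Char) (fuel : Nat), l.length ≤ fuel →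
      PySem.Chars.replace.go [k] v fuel l acc
        = acc.reverse ++ l.flatMap (fun c => if c = k then v else [c]) := by
  intro l
  induction l with
  | nil =>
      intro acc fuel _
      cases fuel <;> simp [PySem.Chars.replace.go]
  | cons c t ih =>
      intro acc fuel hle
      cases fuel with
      | zero => simp at hle
      | succ n =>
          simp only [PySem.Chars.replace.go]
          by_cases hc : c = k
          · subst hc
            rw [if_pos (by simp [List.isPrefixOf])]
            simp only [List.length_cons, List.length_nil, Nat.zero_add, List.drop_succ_cons,
              List.drop_zero]
            rw [ih _ n (by simpa using hle)]
            simp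
          · rw [if_neg (by simp [List.isPrefixOf]; exact fun h => hc h.symm)]
            rw [ih _ n (by simpa using hle)]
            simp [hc]

theorem replace_single (k : Char) (v l : List Char) :
    PySem.Chars.replace l [k] v = l.flatMap (fun c => if c = k then v else [c]) := by
  simpa [PySem.Chars.replace] using replace_go_single k v l [] l.length le_rfl

theorem itemsA : pvAReplDict.items = [("0", "líng"), ("1", "yī"), ("2", "èr"), ("3", "sān"),
    ("4", "sì"), ("5", "wǔ"), ("6", "liù"), ("7", "qī"), ("8", "bā"), ("9", "jiǔ"), ("%", "pā")] := by
  decide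

theorem flatten_intersperse_nil {α : Type} (l : List (List α)) :
    (List.intersperse ([] : List α) l).flatten = l.flatten := by
  induction l with
  | nil => rfl
  | cons a t ih =>
      cases t with
      | nil => rfl
      | cons b u => simpa [List.intersperse] using ih

theorem alt_toList (s : String) :
    (convert_digits_to_pinyin_alt s).toList = s.toList.flatMap (fun c => (pvPinyin c).toList) := by
  simp only [convert_digits_to_pinyin_alt, PySem.Str.toList_join, PySem.Chars.join,
    List.intercalate, List.map_map, List.flatMap, show ("" : String).toList = [] from rfl]
  rw [flatten_intersperse_nil]
  rfl

-- A's eleven successive replaces, fused into one character-wise flatMap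
set_option maxHeartbeats 2000000 in
theorem a_core (l : List Char) :
    (pvAReplDict.items.foldl (fun s kv => PySem.Chars.replace s kv.1.toList kv.2.toList) l)
      = l.flatMap (fun c => (pvPinyin c).toList) := by
  induction l with
  | nil => decide
  | cons c t ih =>
      simp only [itemsA, List.foldl,
        show ("0" : String).toList = ['0'] from rfl, show ("1" : String).toList = ['1'] from rfl,
        show ("2" : String).toList = ['2'] from rfl, show ("3" : String).toList = ['3'] from rfl,
        show ("4" : String).toList = ['4'] from rfl, show ("5" : String).toList = ['5'] from rfl,
        show ("6" : String).toList = ['6'] from rfl, show ("7" : String).toList = ['7'] from rfl,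
        show ("8" : String).toList = ['8'] from rfl, show ("9" : String).toList = ['9'] from rfl,
        show ("%" : String).toList = ['%'] from rfl, replace_single] at ih ⊢
      simp only [List.flatMap_cons, List.flatMap_append] at ih ⊢
      rw [ih]
      refine (List.append_left_inj _).mpr ?_
      by_cases h0 : c = '0'; · subst h0; decide
      by_cases h1 : c = '1'; · subst h1; decide
      by_cases h2 : c = '2'; · subst h2; decide
      by_cases h3 : c = '3'; · subst h3; decide
      by_cases h4 : c = '4'; · subst h4; decide
      by_cases h5 : c = '5'; · subst h5; decide
      by_cases h6 : c = '6'; · subst h6; decide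
      by_cases h7 : c = '7'; · subst h7; decide
      by_cases h8 : c = '8'; · subst h8; decide
      by_cases h9 : c = '9'; · subst h9; decide
      by_cases hp : c = '%'; · subst hp; decide
      simp [pvPinyin, h0, h1, h2, h3, h4, h5, h6, h7, h8, h9, hp, String.singleton]

theorem foldl_replace_toList (l : List (String × String)) (s : String) :
    (l.foldl (fun s kv => PySem.Str.replace s kv.1 kv.2) s).toList
      = l.foldl (fun s kv => PySem.Chars.replace s kv.1.toList kv.2.toList) s.toList := by
  induction l generalizing s with
  | nil => rfl
  | cons kv t ih => simp [List.foldl, ih, PySem.Str.toList_replace]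

-- ===== VERDICT (by name: the statement is the Claim_ definition above) =====
theorem convert_digits_to_pinyin_spec : Claim_equal_convert_digits_to_pinyin := by
  intro s _
  show convert_digits_to_pinyin s = convert_digits_to_pinyin_alt s
  apply String.ext_iff.mpr
  rw [alt_toList, ← a_core]
  exact foldl_replace_toList _ s
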